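-- pv_equiv track=rewrite | github.com/sangrokhan/remote_work | graph_pdf/extractor/tables.py | _collapse_header_rows
-- ===== SOURCE A (Python) =====
-- from typing import Any, List, Optional, Sequence, Tuple
--
-- def _collapse_header_rows(header_rows: Sequence[Sequence[str]]) -> List[str]:
--     # Markdown can only express one header row directly, so fold multi-row headers into one logical row.
--     if not header_rows:
--         return []
--     col_count = max((len(row) for row in header_rows), default=0)
--     collapsed: List[str] = []
--     for col_idx in range(col_count):
--         parts = [
--             str(row[col_idx]).strip()
--             for row in header_rows
--             if col_idx < len(row) and str(row[col_idx]).strip()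
--         ]
--         collapsed.append("\n".join(parts))
--     return collapsed
-- ===== SOURCE B (Python) =====
-- from typing import Any, List, Optional, Sequence, Tuple
--
--
-- def _merge(row, cols):
--     # Stack one header row's cells on top of the already-collapsed columns below it.
--     if not row:
--         return list(cols)
--     top = str(row[0]).strip()
--     below = cols[0] if cols else ""
--     head = "\n".join(p for p in (top, below) if p)
--     return [head] + _merge(row[1:], cols[1:])
--
--
-- def _collapse_header_rows(header_rows: Sequence[Sequence[str]]) -> List[str]:
--     # Recurse on the rows: collapse the remaining rows, then merge the first row on top.
--     if not header_rows:
--         return []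
--     return _merge(header_rows[0], _collapse_header_rows(header_rows[1:]))
-- ===== Notes on version B (the rewrite author's own statement) =====
-- stated objective: alternative
-- what changed: Replaces A's column-index loop (max length, then an inner scan of all rows per column with bounds checks) by structural recursion on the rows: collapse the tail rows, then recursively merge the first row's stripped cells cell-by-cell onto the collapsed columns below.
import Mathlib
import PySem

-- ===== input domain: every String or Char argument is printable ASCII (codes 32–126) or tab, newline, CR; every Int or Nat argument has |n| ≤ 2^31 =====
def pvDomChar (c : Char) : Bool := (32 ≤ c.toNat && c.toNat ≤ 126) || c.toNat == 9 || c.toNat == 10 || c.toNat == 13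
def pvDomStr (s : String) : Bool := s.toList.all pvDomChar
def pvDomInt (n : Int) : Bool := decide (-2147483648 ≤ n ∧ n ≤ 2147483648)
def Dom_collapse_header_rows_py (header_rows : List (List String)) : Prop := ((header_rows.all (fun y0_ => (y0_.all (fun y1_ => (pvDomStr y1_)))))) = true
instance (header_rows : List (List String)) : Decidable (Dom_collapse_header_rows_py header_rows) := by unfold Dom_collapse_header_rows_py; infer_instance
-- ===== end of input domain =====

-- B replaces A's column-index loop by structural recursion on the rows (collapse the
-- tail, then merge the first row cell-by-cell on top); alternative decomposition, same cost.

-- ===== PORT A =====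
-- literal port of A: range over col_count, inner comprehension as an append fold;
-- row[col_idx] is guarded by 'col_idx < len(row)', so pyGetD is exact here.
def collapse_header_rows_py (header_rows : List (List String)) : List String :=
  if header_rows = [] then []
  else
    let col_count : Int :=
      (PySem.List.max? (header_rows.map (fun row => (row.length : Int))) (fun y => y)).getD 0
    (PySem.List.pyRange 0 col_count 1).foldl (fun collapsed col_idx =>
      let parts := header_rows.foldl (fun parts row =>
        if col_idx < (row.length : Int) ∧
            PySem.Str.strip (PySem.List.pyGetD row col_idx "") ≠ "" then
          parts ++ [PySem.Str.strip (PySem.List.pyGetD row col_idx "")]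
        else parts) []
      collapsed ++ [PySem.Str.join "\n" parts]) []

-- ===== PORT B =====
-- _merge(row, cols): stack one row's stripped cells on top of the collapsed columns below.
def pvMerge : List String → List String → List String
  | [], cols => cols
  | c :: rt, cols =>
    let top := PySem.Str.strip c
    let below := cols.headD ""
    let head := PySem.Str.join "\n" (([top, below]).filter (fun p => p ≠ ""))
    head :: pvMerge rt cols.tail

def collapse_header_rows_py_alt : List (List String) → List String
  | [] => []
  | r :: rs => pvMerge r (collapse_header_rows_py_alt rs)

-- ===== PRECONDITION & SPEC =====
def Spec_collapse_header_rows_py (header_rows : List (List String)) (out : List String) : Prop := out = collapse_header_rows_py_alt header_rows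
instance (header_rows : List (List String)) (out : List String) : Decidable (Spec_collapse_header_rows_py header_rows out) := by unfold Spec_collapse_header_rows_py; infer_instance

-- ===== CLAIM (what is proved, stated in full; the proofs are below) =====
def Claim_equal_collapse_header_rows_py : Prop := ∀ (header_rows : List (List String)), Dom_collapse_header_rows_py header_rows → Spec_collapse_header_rows_py header_rows (collapse_header_rows_py header_rows)

-- ===== LEMMAS AND PROOFS =====

-- common characterisation: column j's parts, and the column-count / joined result
def pvMaxLen (rows : List (List String)) : Nat := (rows.map List.length).foldr max 0

def pvParts (rows : List (List String)) (j : Nat) : List String :=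
  ((rows.map (fun r => r.getD j "")).map PySem.Str.strip).filter (fun p => p ≠ "")

def pvF (rows : List (List String)) : List String :=
  (List.range (pvMaxLen rows)).map (fun j => PySem.Str.join "\n" (pvParts rows j))

-- ---- String.join facts ----
theorem pv_sjoin_nil (s : String) : PySem.Str.join s [] = "" := rfl

theorem pv_sjoin_single (s x : String) : PySem.Str.join s [x] = x := by
  apply String.toList_injective
  simp [PySem.Chars.join_singleton]

theorem pv_sjoin_cons2 (s x y : String) (r : List String) :
    PySem.Str.join s (x :: y :: r) = x ++ s ++ PySem.Str.join s (y :: r) := by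
  apply String.toList_injective
  simp [PySem.Chars.join_cons_cons]

theorem pv_sjoin_cons_ne (s x : String) (xs : List String) (hx : x ≠ "") :
    PySem.Str.join s (x :: xs) ≠ "" := by
  cases xs with
  | nil => simpa [pv_sjoin_single] using hx
  | cons y r =>
    rw [pv_sjoin_cons2]
    intro h
    have hlen := congrArg String.toList h
    simp at hlen
    exact hx hlen.1

-- the key merge step on one column
theorem pv_join_step (t : String) (ps : List String) (hps : ∀ p ∈ ps, p ≠ "") :
    PySem.Str.join "\n" (([t, PySem.Str.join "\n" ps]).filter (fun p => p ≠ "")) =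
      PySem.Str.join "\n" ((if t ≠ "" then [t] else []) ++ ps) := by
  cases ps with
  | nil =>
    by_cases ht : t = "" <;>
      simp [ht, List.filter, pv_sjoin_nil, pv_sjoin_single]
  | cons p ps' =>
    have hp : p ≠ "" := hps p (by simp)
    have hJ : PySem.Str.join "\n" (p :: ps') ≠ "" := pv_sjoin_cons_ne _ _ _ hp
    by_cases ht : t = ""
    · simp [ht, List.filter, hJ, pv_sjoin_single]
    · simp [List.filter, ht, hJ, pv_sjoin_cons2, pv_sjoin_single]

-- ---- parts facts ----
theorem pv_parts_cons (r : List String) (rs : List (List String)) (j : Nat) :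
    pvParts (r :: rs) j =
      (if PySem.Str.strip (r.getD j "") ≠ "" then [PySem.Str.strip (r.getD j "")] else [])
        ++ pvParts rs j := by
  by_cases h : PySem.Str.strip (r.getD j "") = "" <;>
    simp_all [pvParts]

theorem pv_parts_ne (rows : List (List String)) (j : Nat) :
    ∀ p ∈ pvParts rows j, p ≠ "" := by
  intro p hp
  have := List.of_mem_filter hp
  simpa using this

theorem pv_maxLen_cons (r : List String) (rs : List (List String)) :
    pvMaxLen (r :: rs) = max r.length (pvMaxLen rs) := rfl

theorem pv_parts_empty_of_ge (rows : List (List String)) (j : Nat)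
    (h : pvMaxLen rows ≤ j) : pvParts rows j = [] := by
  induction rows with
  | nil => rfl
  | cons r rs ih =>
    rw [pv_maxLen_cons] at h
    have h1 : r.length ≤ j := by omega
    have hget : r.getD j "" = "" := by
      rw [List.getD_eq_getElem?_getD, List.getElem?_eq_none (by omega)]; rfl
    have hstrip : PySem.Str.strip ("" : String) = "" := by decide
    rw [pv_parts_cons, hget, hstrip]
    simp [ih (by omega)]

theorem pv_F_length (rows : List (List String)) : (pvF rows).length = pvMaxLen rows := by
  simp [pvF]

theorem pv_F_getD (rows : List (List String)) (j : Nat) :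
    (pvF rows).getD j "" = PySem.Str.join "\n" (pvParts rows j) := by
  by_cases h : j < pvMaxLen rows
  · rw [List.getD_eq_getElem?_getD]
    rw [show (pvF rows)[j]? = some (PySem.Str.join "\n" (pvParts rows j)) from ?_]
    · rfl
    · unfold pvF
      rw [List.getElem?_map, List.getElem?_range h]
      rfl
  · rw [List.getD_eq_getElem?_getD, List.getElem?_eq_none (by rw [pv_F_length]; omega)]
    rw [pv_parts_empty_of_ge rows j (by omega), pv_sjoin_nil]
    rfl

-- ---- B equals pvF ----
theorem pv_getD_tail {α : Type} (l : List α) (j : Nat) (d : α) :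
    l.getD (j + 1) d = l.tail.getD j d := by
  cases l <;> simp

theorem pv_merge_char (r : List String) : ∀ (cols : List String),
    pvMerge r cols =
      (List.range (max r.length cols.length)).map (fun j =>
        PySem.Str.join "\n"
          (([PySem.Str.strip (r.getD j ""), cols.getD j ""]).filter (fun p => p ≠ ""))) := by
  induction r with
  | nil =>
    intro cols
    have hstrip : PySem.Str.strip ("" : String) = "" := by decide
    rw [pvMerge]
    apply List.ext_getElem
    · simp
    · intro j h1 h2
      simp only [List.getElem_map, List.getElem_range]
      have hj : j < cols.length := by simpa using h1
      have hget : cols.getD j "" = cols[j] := by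
        rw [List.getD_eq_getElem?_getD, List.getElem?_eq_getElem hj]; rfl
      simp only [List.getD_nil, hstrip, hget]
      by_cases hc : cols[j] = ""
      · simp [List.filter, hc, pv_sjoin_nil]
      · simp [List.filter, hc, pv_sjoin_single]
  | cons c rt ih =>
    intro cols
    have hmax : max (c :: rt).length cols.length = max rt.length cols.tail.length + 1 := by
      cases cols <;> simp
    rw [hmax, List.range_succ_eq_map, List.map_cons]
    show _ :: _ = _ :: _
    refine List.cons_eq_cons.mpr ⟨?_, ?_⟩
    · cases cols <;> rfl
    · rw [ih cols.tail, List.map_map]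
      apply List.map_congr_left
      intro j _
      simp only [Function.comp_def]
      rw [pv_getD_tail cols j "", show (c :: rt).getD (j + 1) "" = rt.getD j "" by simp]

theorem pv_alt_eq_F (rows : List (List String)) :
    collapse_header_rows_py_alt rows = pvF rows := by
  induction rows with
  | nil => rfl
  | cons r rs ih =>
    rw [collapse_header_rows_py_alt, ih, pv_merge_char, pv_F_length, ← pv_maxLen_cons]
    simp only [pv_F_getD]
    rw [pvF.eq_def]
    apply List.map_congr_left
    intro j _
    rw [pv_join_step _ _ (pv_parts_ne rs j), pv_parts_cons]

-- ---- A equals pvF ----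
theorem pv_foldl_max_cast (t : List (List String)) (a : Nat) :
    (t.map (fun row => (row.length : Int))).foldl max (a : Int) =
      ((t.map List.length).foldl max a : Nat) := by
  induction t generalizing a with
  | nil => simp
  | cons r rs ih =>
    simp only [List.map_cons, List.foldl_cons]
    rw [show max (a : Int) (r.length : Int) = ((max a r.length : Nat) : Int) by push_cast; simp]
    exact ih _

theorem pv_colCount_eq (x : List String) (t : List (List String)) :
    ((PySem.List.max? ((x :: t).map (fun row => (row.length : Int))) (fun y => y)).getD 0)
      = (pvMaxLen (x :: t) : Int) := by
  rw [List.map_cons, PySem.List.max?_id_cons]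
  simp only [Option.getD_some]
  rw [pv_foldl_max_cast t x.length]
  congr 1
  have : pvMaxLen (x :: t) = (x.length :: (t.map List.length)).foldr max 0 := by
    simp [pvMaxLen]
  rw [this, ← List.foldl_eq_foldr]
  simp

theorem pv_col_eq (rows : List (List String)) (i : Nat) :
    ((rows.filter (fun row => decide ((i : Int) < (row.length : Int) ∧
        PySem.Str.strip (PySem.List.pyGetD row (i : Int) "") ≠ ""))).map
          (fun row => PySem.Str.strip (PySem.List.pyGetD row (i : Int) ""))) =
      pvParts rows i := by
  induction rows with
  | nil => rfl
  | cons r rs ih =>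
    rw [pv_parts_cons]
    simp only [PySem.List.pyGetD_natCast, List.getD_eq_getElem?_getD, List.filter_cons,
      Nat.cast_lt] at *
    by_cases hlen : i < r.length
    · have hri : (r[i]?).getD "" = r[i] := by rw [List.getElem?_eq_getElem hlen]; rfl
      by_cases hs : PySem.Str.strip ((r[i]?).getD "") = ""
      · rw [hri] at hs
        simp [hlen, hs]
        simpa using ih
      · rw [hri] at hs
        simp [hlen, hs]
        simpa using ih
    · have hget : (r[i]?).getD "" = "" := by
        rw [List.getElem?_eq_none (by omega)]; rfl
      have hstrip : PySem.Str.strip ("" : String) = "" := by decide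
      simp [hlen, hstrip]
      simpa using ih

theorem pv_a_eq_F (rows : List (List String)) :
    collapse_header_rows_py rows = pvF rows := by
  unfold collapse_header_rows_py
  cases rows with
  | nil => rfl
  | cons x t =>
    simp only [reduceCtorEq, if_false]
    rw [pv_colCount_eq x t]
    rw [PySem.List.foldl_append_singleton_eq_map]
    simp only [List.nil_append]
    rw [PySem.List.pyRange_one]
    simp only [Int.sub_zero, Int.toNat_natCast, List.map_map]
    unfold pvF
    apply List.map_congr_left
    intro i _
    simp only [Function.comp, Int.zero_add]
    rw [PySem.List.foldl_append_ite
      (p := fun row => (i : Int) < (row.length : Int) ∧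
        PySem.Str.strip (PySem.List.pyGetD row (i : Int) "") ≠ "")
      (f := fun row => PySem.Str.strip (PySem.List.pyGetD row (i : Int) ""))]
    rw [List.nil_append, pv_col_eq (x :: t) i]

-- ===== VERDICT (by name: the statement is the Claim_ definition above) =====
theorem collapse_header_rows_py_spec : Claim_equal_collapse_header_rows_py := by
  intro rows _
  unfold Spec_collapse_header_rows_py
  rw [pv_a_eq_F, pv_alt_eq_F]
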